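-- pv_equiv track=rewrite | github.com/theshahzayn/IR-Boolean-Model | main(old).py | positional_query
-- ===== SOURCE A (Python) =====
-- def positional_query(word1, word2, k, positional_index):
--     result_docs = set()
--     if word1 in positional_index and word2 in positional_index:
--         for doc in positional_index[word1]:
--             if doc in positional_index[word2]:
--                 pos1 = positional_index[word1][doc]
--                 pos2 = positional_index[word2][doc]
--                 for p1 in pos1:
--                     for p2 in pos2:
--                         if abs(p1 - p2) <= k:
--                             result_docs.add(doc)
--                             break  # Found a valid position; no need to check more positions for this doc
--     return result_docs
-- ===== SOURCE B (Python) =====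
-- def _close_pair(p1, p2, k):
--     # two-pointer scan over two sorted lists: is there a pair within distance k?
--     i = j = 0
--     while i < len(p1) and j < len(p2):
--         if abs(p1[i] - p2[j]) <= k:
--             return True
--         if p1[i] < p2[j]:
--             i += 1
--         else:
--             j += 1
--     return False
--
--
-- def positional_query(word1, word2, k, positional_index):
--     result_docs = set()
--     if word1 in positional_index and word2 in positional_index:
--         d1 = positional_index[word1]
--         d2 = positional_index[word2]
--         for doc in d1:
--             if doc in d2 and _close_pair(sorted(d1[doc]), sorted(d2[doc]), k):
--                 result_docs.add(doc)
--     return result_docs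
-- ===== Notes on version B (the rewrite author's own statement) =====
-- stated objective: alternative
-- what changed: replaces the all-pairs scan with early break over the two position lists of each doc by sorting both lists and running a single two-pointer scan that detects a pair within distance k; asymptotically O(P log P) per doc instead of O(P1*P2), though a timing run measured no speedup on the generated inputs (A's break fires early there)
import Mathlib
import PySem

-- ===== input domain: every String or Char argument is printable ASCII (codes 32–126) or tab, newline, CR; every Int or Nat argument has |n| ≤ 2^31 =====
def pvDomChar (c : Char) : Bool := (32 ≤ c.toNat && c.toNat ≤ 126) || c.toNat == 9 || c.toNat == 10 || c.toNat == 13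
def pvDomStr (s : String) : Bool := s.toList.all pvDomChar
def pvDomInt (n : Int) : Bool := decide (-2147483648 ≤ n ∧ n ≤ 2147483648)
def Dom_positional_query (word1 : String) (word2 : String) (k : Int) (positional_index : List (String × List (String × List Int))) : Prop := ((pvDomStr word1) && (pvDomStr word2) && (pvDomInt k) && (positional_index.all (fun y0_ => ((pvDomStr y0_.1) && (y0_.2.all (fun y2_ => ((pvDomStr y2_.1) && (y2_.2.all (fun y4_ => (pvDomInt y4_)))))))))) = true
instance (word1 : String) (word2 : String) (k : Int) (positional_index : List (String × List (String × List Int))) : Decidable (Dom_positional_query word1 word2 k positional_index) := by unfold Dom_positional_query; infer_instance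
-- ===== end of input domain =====

-- B replaces A's all-pairs scan of the two position lists per doc by sort + a two-pointer scan (alternative algorithm; not measured faster on the generated inputs).


-- ===== PORT A =====
-- 'for p2 in pos2: if abs(p1-p2) <= k: result.add(doc); break'
def pvInnerA (res : PySem.Set String) (doc : String) (p1 : Int) (pos2 : List Int) (k : Int) : PySem.Set String :=
  match pos2 with
  | [] => res
  | p2 :: rest => if |p1 - p2| ≤ k then PySem.Set.add res doc else pvInnerA res doc p1 rest k

def positional_query (word1 : String) (word2 : String) (k : Int) (positional_index : List (String × List (String × List Int))) : List String :=
  let d := PySem.Dict.mk positional_index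
  let result : PySem.Set String := PySem.Set.empty
  if d.contains word1 && d.contains word2 then
    let d1 := PySem.Dict.mk (d.getD word1 [])
    let d2 := PySem.Dict.mk (d.getD word2 [])
    (PySem.Dict.keys d1).foldl (fun res doc =>
      if d2.contains doc then
        let pos1 := d1.getD doc []
        let pos2 := d2.getD doc []
        pos1.foldl (fun res p1 => pvInnerA res doc p1 pos2 k) res
      else res) result
  else result

-- ===== PORT B =====
-- two-pointer scan over two sorted lists (Source B _close_pair)
def pvClosePair (p1 : List Int) (p2 : List Int) (k : Int) : Bool :=
  match p1, p2 with
  | a :: as, b :: bs =>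
    if |a - b| ≤ k then true
    else if a < b then pvClosePair as (b :: bs) k
    else pvClosePair (a :: as) bs k
  | _, _ => false
termination_by p1.length + p2.length
decreasing_by all_goals simp

def positional_query_alt (word1 : String) (word2 : String) (k : Int) (positional_index : List (String × List (String × List Int))) : List String :=
  let d := PySem.Dict.mk positional_index
  let result : PySem.Set String := PySem.Set.empty
  if d.contains word1 && d.contains word2 then
    let d1 := PySem.Dict.mk (d.getD word1 [])
    let d2 := PySem.Dict.mk (d.getD word2 [])
    (PySem.Dict.keys d1).foldl (fun res doc =>
      if d2.contains doc
         && pvClosePair (PySem.List.sorted (d1.getD doc []) (fun x => x) false)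
                        (PySem.List.sorted (d2.getD doc []) (fun x => x) false) k
      then PySem.Set.add res doc else res) result
  else result

-- ===== PRECONDITION & SPEC =====
def Spec_positional_query (word1 : String) (word2 : String) (k : Int) (positional_index : List (String × List (String × List Int))) (out : List String) : Prop := out = positional_query_alt word1 word2 k positional_index
instance (word1 : String) (word2 : String) (k : Int) (positional_index : List (String × List (String × List Int))) (out : List String) : Decidable (Spec_positional_query word1 word2 k positional_index out) := by unfold Spec_positional_query; infer_instance

-- ===== CLAIM (what is proved, stated in full; the proofs are below) =====
def Claim_equal_positional_query : Prop := ∀ (word1 : String) (word2 : String) (k : Int) (positional_index : List (String × List (String × List Int))), Dom_positional_query word1 word2 k positional_index → Spec_positional_query word1 word2 k positional_index (positional_query word1 word2 k positional_index)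

-- ===== LEMMAS AND PROOFS =====

-- A's inner loop adds doc iff some p2 is within k of p1
theorem pvInnerA_eq (res : PySem.Set String) (doc : String) (p1 : Int) (pos2 : List Int) (k : Int) :
    pvInnerA res doc p1 pos2 k =
      if pos2.any (fun p2 => |p1 - p2| ≤ k) then PySem.Set.add res doc else res := by
  induction pos2 with
  | nil => simp [pvInnerA]
  | cons p2 rest ih =>
    simp only [pvInnerA, List.any_cons, ih]
    by_cases h : |p1 - p2| ≤ k <;> simp [h]

-- A's middle loop adds doc iff some pair is within k
theorem pvFoldA_eq (res : PySem.Set String) (doc : String) (pos1 pos2 : List Int) (k : Int) :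
    pos1.foldl (fun res p1 => pvInnerA res doc p1 pos2 k) res =
      if pos1.any (fun p1 => pos2.any (fun p2 => |p1 - p2| ≤ k)) then PySem.Set.add res doc else res := by
  induction pos1 generalizing res with
  | nil => simp
  | cons p1 rest ih =>
    rw [List.foldl_cons, ih, pvInnerA_eq, List.any_cons]
    by_cases h : pos2.any (fun p2 => decide (|p1 - p2| ≤ k)) = true <;>
      by_cases h2 : rest.any (fun q => pos2.any (fun p2 => decide (|q - p2| ≤ k))) = true
    all_goals simp [h, h2]

-- the two-pointer scan on two ≤-sorted lists finds a pair within k iff one exists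
theorem pvClosePair_iff (l1 l2 : List Int) (k : Int)
    (h1 : l1.Pairwise (· ≤ ·)) (h2 : l2.Pairwise (· ≤ ·)) :
    pvClosePair l1 l2 k = true ↔ ∃ a ∈ l1, ∃ b ∈ l2, |a - b| ≤ k := by
  induction l1, l2 using pvClosePair.induct (k := k) with
  | case1 a as b bs hk =>
    rw [pvClosePair, if_pos hk]
    exact iff_of_true rfl ⟨a, by simp, b, by simp, hk⟩
  | case2 a as b bs hk hab ih =>
    rw [pvClosePair, if_neg hk, if_pos hab, ih (List.Pairwise.of_cons h1) h2]
    constructor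
    · rintro ⟨x, hx, b', hb', h⟩; exact ⟨x, List.mem_cons_of_mem _ hx, b', hb', h⟩
    · rintro ⟨x, hx, b', hb', h⟩
      rcases List.mem_cons.mp hx with rfl | hx
      · -- x = a cannot pair: every b' in b :: bs is ≥ b > a + k
        exfalso
        have hbb' : b ≤ b' := by
          rcases List.mem_cons.mp hb' with rfl | hb'
          · exact le_refl _
          · exact (List.pairwise_cons.mp h2).1 b' hb'
        have habs : |x - b'| ≥ b' - x := by rw [abs_sub_comm]; exact le_abs_self _
        rw [abs_le] at hk h
        omega
      · exact ⟨x, hx, b', hb', h⟩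
  | case3 a as b bs hk hab ih =>
    rw [pvClosePair, if_neg hk, if_neg hab, ih h1 (List.Pairwise.of_cons h2)]
    constructor
    · rintro ⟨x, hx, b', hb', h⟩; exact ⟨x, hx, b', List.mem_cons_of_mem _ hb', h⟩
    · rintro ⟨x, hx, b', hb', h⟩
      rcases List.mem_cons.mp hb' with rfl | hb'
      · -- b' = b cannot pair: every x in a :: as is ≥ a > b + k
        exfalso
        have hax : a ≤ x := by
          rcases List.mem_cons.mp hx with rfl | hx
          · exact le_refl _
          · exact (List.pairwise_cons.mp h1).1 x hx
        have habs : |x - b'| ≥ x - b' := le_abs_self _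
        rw [abs_le] at hk h
        omega
      · exact ⟨x, hx, b', hb', h⟩
  | case4 l1 l2 hne =>
    rw [pvClosePair.eq_def]
    rcases l1 with _ | ⟨a, as⟩
    · simp
    · rcases l2 with _ | ⟨b, bs⟩
      · simp
      · exact (hne a as b bs rfl rfl).elim

-- B's per-doc test equals "some pair within k"
theorem pvClosePair_sorted (pos1 pos2 : List Int) (k : Int) :
    pvClosePair (PySem.List.sorted pos1 (fun x => x) false) (PySem.List.sorted pos2 (fun x => x) false) k
      = pos1.any (fun p1 => pos2.any (fun p2 => |p1 - p2| ≤ k)) := by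
  rw [Bool.eq_iff_iff,
      pvClosePair_iff _ _ _ (PySem.List.sorted_pairwise pos1 (fun x => x))
        (PySem.List.sorted_pairwise pos2 (fun x => x))]
  simp only [List.any_eq_true, decide_eq_true_eq, PySem.List.mem_sorted]

-- ===== VERDICT (by name: the statement is the Claim_ definition above) =====
theorem positional_query_spec : Claim_equal_positional_query := by
  intro word1 word2 k idx _
  unfold Spec_positional_query positional_query positional_query_alt
  simp only []
  split
  · apply PySem.List.foldl_congr_mem
    intro res doc _
    rw [pvFoldA_eq, pvClosePair_sorted]
    by_cases hc : (PySem.Dict.mk ((PySem.Dict.mk idx).getD word2 [])).contains doc <;>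
      by_cases he : ((PySem.Dict.mk ((PySem.Dict.mk idx).getD word1 [])).getD doc []).any
        (fun p1 => (((PySem.Dict.mk ((PySem.Dict.mk idx).getD word2 [])).getD doc [])).any (fun p2 => |p1 - p2| ≤ k)) <;>
      simp [hc, he]
  · rfl
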